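-- pv_equiv track=rewrite | github.com/asem-ai/labs_1 | lab1/1.py | group_by_length
-- ===== SOURCE A (Python) =====
-- def group_by_length(words):
--     result = {}
--     for word in words:
--         length = len(word)
--         if length not in result:
--             result[length] = [word]
--         else:
--             if word not in result[length]:
--                 result[length].append(word)
--     return result
-- ===== SOURCE B (Python) =====
-- def group_by_length(words):
--     # Bucket-major traversal: list the distinct lengths in first-occurrence
--     # order, then build each bucket by its own filtered scan of words,
--     # deduplicating the filtered stream.  Correct because a bucket's word
--     # order is first-occurrence order among words of that length, which a
--     # left-to-right filtered scan reproduces.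
--     lengths = dict.fromkeys(len(w) for w in words)
--     return {L: list(dict.fromkeys(w for w in words if len(w) == L))
--             for L in lengths}
-- ===== Notes on version B (the rewrite author's own statement) =====
-- stated objective: alternative
-- what changed: A's single word-major pass interleaving grouping with a per-bucket membership scan is replaced by a bucket-major two-stage algorithm: first the distinct lengths in first-occurrence order, then one filtered scan of the whole list per length to build that bucket.
import Mathlib
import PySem

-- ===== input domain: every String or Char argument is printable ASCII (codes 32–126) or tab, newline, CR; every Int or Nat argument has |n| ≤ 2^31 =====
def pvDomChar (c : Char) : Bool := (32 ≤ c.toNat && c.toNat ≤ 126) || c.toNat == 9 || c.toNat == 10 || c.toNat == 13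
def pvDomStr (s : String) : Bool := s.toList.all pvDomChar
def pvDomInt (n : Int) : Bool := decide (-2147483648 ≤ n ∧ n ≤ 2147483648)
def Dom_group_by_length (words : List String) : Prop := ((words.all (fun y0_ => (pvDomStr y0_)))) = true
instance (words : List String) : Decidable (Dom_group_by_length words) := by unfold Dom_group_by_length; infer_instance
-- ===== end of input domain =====

-- B replaces A's single word-major pass (grouping interleaved with a per-bucket membership
-- scan) by a bucket-major two-stage algorithm: distinct lengths first, then one filtered
-- scan of the list per length (alternative decomposition, not claimed faster).


-- ===== PORT A =====
def group_by_length (words : List String) : List (Int × List String) :=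
  (words.foldl (fun result word =>
      let length : Int := PySem.Str.len word
      if result.contains length = false then
        result.insert length [word]
      else if word ∉ result.getD length [] then
        result.modify length [] (fun l => l ++ [word])
      else
        result)
    PySem.Dict.empty).items

-- ===== PORT B =====
def group_by_length_alt (words : List String) : List (Int × List String) :=
  let lengths := PySem.List.dedup (words.map (fun w => PySem.Str.len w))
  (lengths.foldl (fun result L =>
      result.insert L (PySem.List.dedup (words.filter (fun w => PySem.Str.len w == L))))
    PySem.Dict.empty).items

-- ===== PRECONDITION & SPEC =====
def Spec_group_by_length (words : List String) (out : List (Int × List String)) : Prop := out = group_by_length_alt words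
instance (words : List String) (out : List (Int × List String)) : Decidable (Spec_group_by_length words out) := by unfold Spec_group_by_length; infer_instance

-- ===== CLAIM (what is proved, stated in full; the proofs are below) =====
def Claim_equal_group_by_length : Prop := ∀ (words : List String), Dom_group_by_length words → Spec_group_by_length words (group_by_length words)

-- ===== LEMMAS AND PROOFS =====

-- A's loop body, named for the proof
def stepA (d : PySem.Dict Int (List String)) (w : String) : PySem.Dict Int (List String) :=
  if d.contains (PySem.Str.len w) = false then d.insert (PySem.Str.len w) [w]
  else if w ∉ d.getD (PySem.Str.len w) [] then d.modify (PySem.Str.len w) [] (fun l => l ++ [w])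
  else d

-- the bucket of length L, as B computes it over prefix p
def bucket (p : List String) (L : Int) : List String :=
  PySem.List.dedup (p.filter (fun w => PySem.Str.len w == L))

def canonItems (p : List String) : List (Int × List String) :=
  (PySem.List.dedup (p.map (fun w => PySem.Str.len w))).map (fun L => (L, bucket p L))

def canonD (p : List String) : PySem.Dict Int (List String) := PySem.Dict.mk (canonItems p)

lemma dedup_append_singleton {α : Type} [BEq α] [LawfulBEq α] (xs : List α) (x : α) :
    PySem.List.dedup (xs ++ [x]) =
      if x ∈ PySem.List.dedup xs then PySem.List.dedup xs else PySem.List.dedup xs ++ [x] := by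
  simp [PySem.List.dedup, PySem.Set.ofList, List.foldl_append, PySem.Set.add]

lemma keys_canonD (p : List String) :
    (canonD p).keys = PySem.List.dedup (p.map (fun w => PySem.Str.len w)) := by
  show (canonItems p).map Prod.fst = _
  unfold canonItems
  rw [List.map_map]
  exact (List.map_congr_left fun a _ => rfl).trans (List.map_id _)

lemma canon_getD (p : List String) (L : Int)
    (h : L ∈ PySem.List.dedup (p.map (fun w => PySem.Str.len w))) :
    (canonD p).getD L [] = bucket p L := by
  apply PySem.Dict.getD_of_mem_items
  · exact List.mem_map.mpr ⟨L, h, rfl⟩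
  · rw [keys_canonD]; exact PySem.List.nodup_dedup _

lemma canon_contains (p : List String) (L : Int) :
    (canonD p).contains L =
      decide (L ∈ PySem.List.dedup (p.map (fun w => PySem.Str.len w))) := by
  rw [PySem.Dict.contains_eq_decide_mem_keys, keys_canonD]

lemma bucket_append_of_ne (p : List String) (w : String) (L : Int)
    (h : PySem.Str.len w ≠ L) : bucket (p ++ [w]) L = bucket p L := by
  have hb : (PySem.Str.len w == L) = false := beq_eq_false_iff_ne.mpr h
  unfold bucket
  rw [List.filter_append]
  simp only [List.filter_cons, hb, Bool.false_eq_true, if_false, List.filter_nil,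
    List.append_nil]

lemma bucket_append_self (p : List String) (w : String) :
    bucket (p ++ [w]) (PySem.Str.len w) =
      if w ∈ bucket p (PySem.Str.len w) then bucket p (PySem.Str.len w)
      else bucket p (PySem.Str.len w) ++ [w] := by
  unfold bucket
  rw [List.filter_append]
  simp only [List.filter_cons, beq_self_eq_true, if_pos, List.filter_nil]
  exact dedup_append_singleton (p.filter (fun v => PySem.Str.len v == PySem.Str.len w)) w

lemma map_len_append (p : List String) (w : String) :
    (p ++ [w]).map (fun v => PySem.Str.len v) =
      p.map (fun v => PySem.Str.len v) ++ [PySem.Str.len w] := by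
  rw [List.map_append, List.map_cons, List.map_nil]

lemma stepA_canon (p : List String) (w : String) :
    stepA (canonD p) w = canonD (p ++ [w]) := by
  by_cases hm : PySem.Str.len w ∈ PySem.List.dedup (p.map (fun v => PySem.Str.len v))
  · -- the length already has a bucket
    have hc : (canonD p).contains (PySem.Str.len w) = true := by
      rw [canon_contains]; simpa using hm
    have hget := canon_getD p (PySem.Str.len w) hm
    by_cases hw : w ∈ bucket p (PySem.Str.len w)
    · -- word already in its bucket: A leaves the dict unchanged
      have hstep : stepA (canonD p) w = canonD p := by
        unfold stepA
        rw [if_neg (by rw [hc]; exact fun h => nomatch h), hget, if_neg (not_not_intro hw)]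
      rw [hstep]
      apply PySem.Dict.ext
      show canonItems p = canonItems (p ++ [w])
      unfold canonItems
      rw [map_len_append, dedup_append_singleton, if_pos hm]
      refine List.map_congr_left (fun L hL => ?_)
      by_cases hLe : PySem.Str.len w = L
      · subst hLe; rw [bucket_append_self, if_pos hw]
      · rw [bucket_append_of_ne p w L hLe]
    · -- word new in an existing bucket: A appends it
      have hstep : stepA (canonD p) w =
          (canonD p).insert (PySem.Str.len w) (bucket p (PySem.Str.len w) ++ [w]) := by
        unfold stepA PySem.Dict.modify
        rw [if_neg (by rw [hc]; exact fun h => nomatch h), hget, if_pos hw]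
      rw [hstep]
      apply PySem.Dict.ext
      rw [PySem.Dict.items_insert_of_contains _ _ hc]
      show (canonItems p).map _ = canonItems (p ++ [w])
      unfold canonItems
      rw [map_len_append, dedup_append_singleton, if_pos hm, List.map_map]
      refine List.map_congr_left (fun L hL => ?_)
      simp only [Function.comp_def]
      by_cases hLe : PySem.Str.len w = L
      · subst hLe
        rw [if_pos (beq_self_eq_true (PySem.Str.len w)), bucket_append_self, if_neg hw]
      · have hb : (L == PySem.Str.len w) = false :=
          beq_eq_false_iff_ne.mpr (fun h => hLe h.symm)
        rw [if_neg (by rw [hb]; exact fun h => nomatch h), bucket_append_of_ne p w L hLe]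
  · -- a fresh length: A opens a new bucket at the end
    have hc : (canonD p).contains (PySem.Str.len w) = false := by
      rw [canon_contains]; simpa using hm
    have hstep : stepA (canonD p) w = (canonD p).insert (PySem.Str.len w) [w] := by
      unfold stepA
      rw [if_pos hc]
    rw [hstep]
    apply PySem.Dict.ext
    rw [PySem.Dict.items_insert_of_not_contains _ _ hc]
    show canonItems p ++ [(PySem.Str.len w, [w])] = canonItems (p ++ [w])
    have hfil : p.filter (fun v => PySem.Str.len v == PySem.Str.len w) = [] := by
      refine List.filter_eq_nil_iff.mpr (fun a ha => ?_)
      simp only [beq_iff_eq]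
      intro hlen
      exact hm ((PySem.List.mem_dedup _ _).mpr (List.mem_map.mpr ⟨a, ha, hlen⟩))
    have hempty : bucket p (PySem.Str.len w) = [] := by
      unfold bucket; rw [hfil]; rfl
    have hbw : bucket (p ++ [w]) (PySem.Str.len w) = [w] := by
      rw [bucket_append_self, hempty, if_neg (List.not_mem_nil), List.nil_append]
    unfold canonItems
    rw [map_len_append, dedup_append_singleton, if_neg hm, List.map_append,
      List.map_cons, List.map_nil, hbw]
    refine congrArg (· ++ [(PySem.Str.len w, [w])]) ?_
    refine List.map_congr_left (fun L hL => ?_)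
    rw [bucket_append_of_ne p w L (fun h => hm (h ▸ hL))]

lemma foldA_eq (p : List String) : p.foldl stepA PySem.Dict.empty = canonD p := by
  induction p using List.reverseRecOn with
  | nil => rfl
  | append_singleton p w ih =>
      rw [List.foldl_append, List.foldl_cons, List.foldl_nil, ih, stepA_canon]

lemma alt_eq (words : List String) : group_by_length_alt words = canonItems words := by
  unfold group_by_length_alt
  have h := PySem.Dict.items_foldl_insert_fresh
      (PySem.List.dedup (words.map (fun w => PySem.Str.len w)))
      (fun L => L)
      (fun L => PySem.List.dedup (words.filter (fun w => PySem.Str.len w == L)))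
      PySem.Dict.empty
      (fun a _ => PySem.Dict.contains_empty a)
      (by simpa using PySem.List.nodup_dedup (words.map (fun w => PySem.Str.len w)))
  simpa [canonItems, bucket] using h

-- ===== VERDICT (by name: the statement is the Claim_ definition above) =====
theorem group_by_length_spec : Claim_equal_group_by_length := by
  intro words _
  unfold Spec_group_by_length
  have hA : group_by_length words = (words.foldl stepA PySem.Dict.empty).items := rfl
  rw [hA, foldA_eq, alt_eq]
  rfl
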